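-- pv_equiv track=rewrite | github.com/Marlysson/Tecnologo-ADS | Algoritmos/2 Prova de Algoritmos/operacoes.py | busca_by
-- ===== SOURCE A (Python) =====
-- def busca_by(familias,cod=None,uf=None,city=None):
--
-- 	if cod:
-- 		familias = [f for f in familias if f[0] == cod]
-- 	if uf:
-- 		familias = [f for f in familias if f[2] == uf]
-- 	if city:
-- 		familias = [f for f in familias if f[3] == city]
--
-- 	return familias
-- ===== SOURCE B (Python) =====
-- def busca_by(familias, cod=None, uf=None, city=None):
--     # table-driven: build the list of active criteria as predicate closures once,
--     # then one scan with an accumulator keeps elements passing all of them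
--     preds = []
--     if cod:
--         preds.append(lambda f: f[0] == cod)
--     if uf:
--         preds.append(lambda f: f[2] == uf)
--     if city:
--         preds.append(lambda f: f[3] == city)
--     out = []
--     for f in familias:
--         if all(p(f) for p in preds):
--             out.append(f)
--     return out
-- ===== Notes on version B (the rewrite author's own statement) =====
-- stated objective: alternative
-- what changed: A rebuilds the list up to three times, once per hard-coded criterion; B is table-driven: it first builds a list of predicate closures for the active criteria, then performs a single accumulator scan keeping elements that satisfy every predicate in the table (truthiness of cod/uf/city preserved).
import Mathlib
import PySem

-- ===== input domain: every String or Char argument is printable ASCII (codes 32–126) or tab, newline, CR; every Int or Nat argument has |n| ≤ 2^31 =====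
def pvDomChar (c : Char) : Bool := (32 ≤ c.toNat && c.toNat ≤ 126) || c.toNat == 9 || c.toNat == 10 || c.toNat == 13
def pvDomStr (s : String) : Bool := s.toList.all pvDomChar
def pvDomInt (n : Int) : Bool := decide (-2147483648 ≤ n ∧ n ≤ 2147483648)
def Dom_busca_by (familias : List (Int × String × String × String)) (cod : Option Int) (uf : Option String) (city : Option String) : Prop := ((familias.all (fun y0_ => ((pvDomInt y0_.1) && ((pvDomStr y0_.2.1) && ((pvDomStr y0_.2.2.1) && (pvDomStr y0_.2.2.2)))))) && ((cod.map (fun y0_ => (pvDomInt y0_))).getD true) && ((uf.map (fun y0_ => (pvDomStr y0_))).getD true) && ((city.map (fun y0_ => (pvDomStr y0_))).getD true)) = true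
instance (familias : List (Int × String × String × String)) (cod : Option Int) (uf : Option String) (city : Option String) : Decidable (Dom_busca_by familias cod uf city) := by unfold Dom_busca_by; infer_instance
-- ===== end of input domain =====

-- B is table-driven: it builds a list of predicate closures for the active
-- criteria once, then a single accumulator scan keeps elements passing all of
-- them (objective: alternative); same results, Python truthiness preserved.

-- Python truthiness of the optional arguments: None and 0 are falsy for cod,
-- None and "" are falsy for uf/city.
def pvTruthyInt (o : Option Int) : Bool :=
  match o with
  | some n => n != 0
  | none => false

def pvTruthyStr (o : Option String) : Bool :=
  match o with
  | some s => s != ""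
  | none => false

-- ===== PORT A =====
-- three sequential passes, rebinding `familias` each time, exactly as A does
def busca_by (familias : List (Int × String × String × String)) (cod : Option Int) (uf : Option String) (city : Option String) : List (Int × String × String × String) :=
  let familias := if pvTruthyInt cod then familias.filter (fun f => some f.1 == cod) else familias
  let familias := if pvTruthyStr uf then familias.filter (fun f => some f.2.2.1 == uf) else familias
  let familias := if pvTruthyStr city then familias.filter (fun f => some f.2.2.2 == city) else familias
  familias

-- ===== PORT B =====
-- build the predicate table for the active criteria, then one scan with an
-- accumulator keeping f iff every predicate in the table holds
def busca_by_alt (familias : List (Int × String × String × String)) (cod : Option Int) (uf : Option String) (city : Option String) : List (Int × String × String × String) :=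
  let preds : List ((Int × String × String × String) → Bool) := []
  let preds := if pvTruthyInt cod then preds ++ [fun f => some f.1 == cod] else preds
  let preds := if pvTruthyStr uf then preds ++ [fun f => some f.2.2.1 == uf] else preds
  let preds := if pvTruthyStr city then preds ++ [fun f => some f.2.2.2 == city] else preds
  familias.foldl (fun out f => if preds.all (fun p => p f) then out ++ [f] else out) []

-- ===== PRECONDITION & SPEC =====
def Spec_busca_by (familias : List (Int × String × String × String)) (cod : Option Int) (uf : Option String) (city : Option String) (out : List (Int × String × String × String)) : Prop := out = busca_by_alt familias cod uf city
instance (familias : List (Int × String × String × String)) (cod : Option Int) (uf : Option String) (city : Option String) (out : List (Int × String × String × String)) : Decidable (Spec_busca_by familias cod uf city out) := by unfold Spec_busca_by; infer_instance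

-- ===== CLAIM (what is proved, stated in full; the proofs are below) =====
def Claim_equal_busca_by : Prop := ∀ (familias : List (Int × String × String × String)) (cod : Option Int) (uf : Option String) (city : Option String), Dom_busca_by familias cod uf city → Spec_busca_by familias cod uf city (busca_by familias cod uf city)

-- ===== LEMMAS AND PROOFS =====
theorem pv_flatten_map_singleton {α : Type} (l : List α) :
    (List.map (fun x => [x]) l).flatten = l := by
  induction l with
  | nil => rfl
  | cons a t ih => simp [ih]

-- ===== VERDICT (by name: the statement is the Claim_ definition above) =====
theorem busca_by_spec : Claim_equal_busca_by := by
  intro familias cod uf city _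
  unfold Spec_busca_by busca_by busca_by_alt
  by_cases h1 : pvTruthyInt cod = true <;>
  by_cases h2 : pvTruthyStr uf = true <;>
  by_cases h3 : pvTruthyStr city = true <;>
    simp only [h1, h2, h3, if_true, if_false, Bool.false_eq_true, List.nil_append,
      List.cons_append, List.all_nil, List.all_cons, Bool.and_true,
      PySem.List.foldl_append_if_eq_filter] <;>
    simp [List.filter_filter, Bool.and_comm, Bool.and_assoc, pv_flatten_map_singleton]
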